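-- pv_equiv track=rewrite | github.com/fuffffu/cs61a | lec3/num_eights.py | digit_distance
-- ===== SOURCE A (Python) =====
-- def digit_distance(n):
--     if n>10:
--         last=n%10
--         second_last=(n//10)%10
--         distance=abs(last-second_last)
--         return distance+digit_distance(n//10)
--     else:
--         return 0
-- ===== SOURCE B (Python) =====
-- def digit_distance(n):
--     total = 0
--     while n > 10:
--         total += abs(n % 10 - (n // 10) % 10)
--         n //= 10
--     return total
-- ===== Notes on version B (the rewrite author's own statement) =====
-- stated objective: idiomatic
-- what changed: Replaces the non-tail recursion with an iterative while-loop accumulating the total in a single variable.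
import Mathlib
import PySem

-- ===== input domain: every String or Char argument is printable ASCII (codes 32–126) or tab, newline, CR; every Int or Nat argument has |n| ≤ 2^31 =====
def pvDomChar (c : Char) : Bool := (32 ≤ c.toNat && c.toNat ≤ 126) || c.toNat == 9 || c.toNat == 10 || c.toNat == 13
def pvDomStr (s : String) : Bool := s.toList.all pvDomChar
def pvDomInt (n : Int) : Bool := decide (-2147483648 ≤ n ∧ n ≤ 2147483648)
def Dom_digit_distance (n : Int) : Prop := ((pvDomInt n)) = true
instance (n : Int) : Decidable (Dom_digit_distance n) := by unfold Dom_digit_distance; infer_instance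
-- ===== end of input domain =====

-- B replaces A's non-tail recursion by an iterative accumulator loop with the same guard; equal on all inputs.


-- termination helper for both ports: n // 10 < n when 10 < n
theorem pv_fd10_lt (n : Int) (h : 10 < n) : (PySem.Int.floordiv n 10).toNat < n.toNat := by
  have h1 : 0 ≤ PySem.Int.floordiv n 10 := by
    rw [PySem.Int.floordiv_eq_ediv_of_pos (by norm_num)]
    exact Int.ediv_nonneg (by omega) (by norm_num)
  have h2 : PySem.Int.floordiv n 10 < n :=
    (PySem.Int.floordiv_lt_iff_lt_mul (by norm_num)).mpr (by nlinarith)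
  omega

-- ===== PORT A =====
def digit_distance (n : Int) : Int :=
  if h : n > 10 then
    let last := PySem.Int.mod n 10
    let second_last := PySem.Int.mod (PySem.Int.floordiv n 10) 10
    let distance := |last - second_last|
    distance + digit_distance (PySem.Int.floordiv n 10)
  else 0
termination_by n.toNat
decreasing_by exact pv_fd10_lt n h

-- ===== PORT B =====
-- the while loop of Source B, state = (n, total)
def digit_distance_alt_loop (n total : Int) : Int :=
  if h : n > 10 then
    digit_distance_alt_loop (PySem.Int.floordiv n 10)
      (total + |PySem.Int.mod n 10 - PySem.Int.mod (PySem.Int.floordiv n 10) 10|)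
  else total
termination_by n.toNat
decreasing_by exact pv_fd10_lt n h

def digit_distance_alt (n : Int) : Int := digit_distance_alt_loop n 0

-- ===== PRECONDITION & SPEC =====
def Spec_digit_distance (n : Int) (out : Int) : Prop := out = digit_distance_alt n
instance (n : Int) (out : Int) : Decidable (Spec_digit_distance n out) := by unfold Spec_digit_distance; infer_instance

-- ===== CLAIM (what is proved, stated in full; the proofs are below) =====
def Claim_equal_digit_distance : Prop := ∀ (n : Int), Dom_digit_distance n → Spec_digit_distance n (digit_distance n)

-- ===== LEMMAS AND PROOFS =====
theorem loop_adds (n : Int) : ∀ total : Int, digit_distance_alt_loop n total = total + digit_distance n := by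
  induction n using digit_distance.induct with
  | case1 n h ih =>
    intro total
    rw [digit_distance_alt_loop, digit_distance]
    simp only [h, dite_true, ih]
    ring
  | case2 n h =>
    intro total
    rw [digit_distance_alt_loop, digit_distance]
    simp [h]

-- ===== VERDICT (by name: the statement is the Claim_ definition above) =====
theorem digit_distance_spec : Claim_equal_digit_distance := by
  intro n _
  unfold Spec_digit_distance digit_distance_alt
  rw [loop_adds]
  ring
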